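-- pv_equiv track=rewrite | github.com/maxcohen31/Codewars-Solutions | Codewars/Minimize_Sum_Of_Array_7_kyu.py | min_sum3
-- ===== SOURCE A (Python) =====
-- def min_sum3(arr):
--     arr = sorted(arr)
--     result = 0
--
--     for numb in arr:
--         result += max(arr) * min(arr)
--         arr.remove(max(arr))
--         arr.remove(min(arr))
--     return result
-- ===== SOURCE B (Python) =====
-- def min_sum3(arr):
--     s = sorted(arr)
--     n = len(s)
--     return sum(s[k] * s[n - 1 - k] for k in range((n + 2) // 3))
-- ===== Notes on version B (the rewrite author's own statement) =====
-- stated objective: faster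
-- what changed: Replaces the quadratic mutate-while-iterating loop (recomputing max/min and removing them each pass) with a single sort followed by a closed-form sum of sorted[k]*sorted[n-1-k] for k < ceil(n/3).
-- outside the precondition, e.g. on min_sum3([3]): A raises ValueError, B returns 9
import Mathlib
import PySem

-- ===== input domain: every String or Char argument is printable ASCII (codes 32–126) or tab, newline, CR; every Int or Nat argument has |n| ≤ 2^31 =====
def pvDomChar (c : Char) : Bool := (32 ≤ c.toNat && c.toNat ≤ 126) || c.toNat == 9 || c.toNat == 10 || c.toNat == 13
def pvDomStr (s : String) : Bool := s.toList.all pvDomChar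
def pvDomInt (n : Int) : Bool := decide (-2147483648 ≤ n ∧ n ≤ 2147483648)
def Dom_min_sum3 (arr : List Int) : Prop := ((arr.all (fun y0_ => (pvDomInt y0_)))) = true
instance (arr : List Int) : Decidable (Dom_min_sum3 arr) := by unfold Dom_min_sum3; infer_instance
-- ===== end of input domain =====

-- B replaces A's quadratic mutate-while-iterating loop by one sort and a closed-form
-- sum of sorted[k]*sorted[n-1-k] for k < ceil(n/3); A mutates its local copy only.


-- ===== PORT A =====
-- A's `for numb in arr` iterates by index over the list it mutates: each pass the index
-- advances by 1 and two elements are removed, so the loop runs while i < len(arr).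
-- fuel = initial length bounds the number of passes; the `none` branches are where the
-- Python raises ValueError (min of an empty list, reachable only for a singleton input,
-- excluded by Pre_) — the returned value there is never claimed about.
def pvAGo : Nat → List Int → Nat → Int → Int
  | 0, _, _, r => r
  | fuel+1, xs, i, r =>
    if i < xs.length then
      match PySem.List.max? xs (fun y => y), PySem.List.min? xs (fun y => y) with
      | some mx, some mn =>
        let r' := r + mx * mn
        match PySem.List.remove? xs mx with
        | some xs1 =>
          match PySem.List.min? xs1 (fun y => y) with
          | some mn2 =>
            match PySem.List.remove? xs1 mn2 with
            | some xs2 => pvAGo fuel xs2 (i+1) r'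
            | none => r'
          | none => r'
        | none => r'
      | _, _ => r
    else r

def min_sum3 (arr : List Int) : Int :=
  pvAGo arr.length (PySem.List.sorted arr (fun y => y)) 0 0

-- ===== PORT B =====
-- sum(s[k] * s[n-1-k] for k in range((n+2)//3)); the indices are always in range
-- (proved below), so `.getD 0` never supplies its default.
def min_sum3_alt (arr : List Int) : Int :=
  let s := PySem.List.sorted arr (fun y => y)
  let n : Int := s.length
  (PySem.List.pyRange 0 (PySem.Int.floordiv (n + 2) 3)).foldl
    (fun acc k =>
      acc + (PySem.List.pyGet? s k).getD 0 * (PySem.List.pyGet? s (n - 1 - k)).getD 0) 0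

-- ===== PRECONDITION & SPEC =====
-- Pre_ excludes exactly the one-element lists, on which A raises ValueError
-- (min() of the empty list left after the two removals of the single pass).
def Pre_min_sum3 (arr : List Int) : Prop := arr.length ≠ 1
instance (arr : List Int) : Decidable (Pre_min_sum3 arr) := by unfold Pre_min_sum3; infer_instance
def pvWitness_min_sum3 : List Int := [5, -1, 3, 3]

def Spec_min_sum3 (arr : List Int) (out : Int) : Prop := out = min_sum3_alt arr
instance (arr : List Int) (out : Int) : Decidable (Spec_min_sum3 arr out) := by unfold Spec_min_sum3; infer_instance

-- ===== CLAIM (what is proved, stated in full; the proofs are below) =====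
def Claim_equal_min_sum3 : Prop := ∀ (arr : List Int), Dom_min_sum3 arr → Pre_min_sum3 arr → Spec_min_sum3 arr (min_sum3 arr)

-- ===== LEMMAS AND PROOFS =====

-- the value both programs compute, in clean form: sum over j < ceil((len-i)/3)
-- of s[j] * s[len-1-j]
def pvChunk (s : List Int) (i : Nat) : Int :=
  ((List.range ((s.length - i + 2) / 3)).map
    (fun j => s.getD j 0 * s.getD (s.length - 1 - j) 0)).sum

theorem pv_le_getLast {t : List Int} (hs : t.Pairwise (· ≤ ·)) (ht : t ≠ []) :
    ∀ y ∈ t, y ≤ t.getLast ht := by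
  induction t with
  | nil => simp at ht
  | cons x u ih =>
    intro y hy
    rcases u with _ | ⟨z, v⟩
    · simp at hy; simp [hy]
    · rcases List.mem_cons.mp hy with h | h
      · subst h
        have hx : y ≤ z := (List.pairwise_cons.mp hs).1 z (by simp)
        have := ih (List.pairwise_cons.mp hs).2 (by simp) z (by simp)
        calc y ≤ z := hx
          _ ≤ (z :: v).getLast (by simp) := this
          _ = (y :: z :: v).getLast ht := (List.getLast_cons (by simp)).symm
      · have := ih (List.pairwise_cons.mp hs).2 (by simp) y h
        calc y ≤ (z :: v).getLast (by simp) := this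
          _ = (x :: z :: v).getLast ht := (List.getLast_cons (by simp)).symm

theorem pv_foldl_max_sorted : ∀ {t : List Int} (x : Int), (x :: t).Pairwise (· ≤ ·) →
    t.foldl max x = (x :: t).getLast (by simp) := by
  intro t
  induction t with
  | nil => intro x _; rfl
  | cons z v ih =>
    intro x hs
    have hxz : x ≤ z := (List.pairwise_cons.mp hs).1 z (by simp)
    have : (z :: v).foldl max x = v.foldl max z := by
      simp [List.foldl, max_eq_right hxz]
    rw [this, ih z (List.pairwise_cons.mp hs).2]
    exact (List.getLast_cons (by simp)).symm

theorem pv_foldl_min_sorted {t : List Int} (x : Int) (hs : (x :: t).Pairwise (· ≤ ·)) :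
    t.foldl min x = x := by
  have hx : ∀ y ∈ t, x ≤ y := (List.pairwise_cons.mp hs).1
  induction t generalizing x with
  | nil => rfl
  | cons z v ih =>
    have hxz : x ≤ z := hx z (by simp)
    have : min x z = x := min_eq_left hxz
    simp only [List.foldl, this]
    exact ih x (by
      constructor
      · intro b hb; exact hx b (List.mem_cons_of_mem _ hb)
      · exact (List.pairwise_cons.mp (List.pairwise_cons.mp hs).2).2) 
      (fun y hy => hx y (List.mem_cons_of_mem _ hy))

-- erasing the last element's value from a sorted list drops the last element
theorem pv_erase_getLast {m : List Int} (hs : m.Pairwise (· ≤ ·)) (hm : m ≠ []) :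
    m.erase (m.getLast hm) = m.dropLast := by
  induction m with
  | nil => simp at hm
  | cons x t ih =>
    rcases t with _ | ⟨z, v⟩
    · simp
    · set t := z :: v with ht
      have hlast : (x :: t).getLast hm = t.getLast (by simp [ht]) :=
        List.getLast_cons (by simp [ht])
      by_cases hx : x = t.getLast (by simp [ht])
      · -- all elements equal x: both sides are replicates
        have hall : ∀ y ∈ x :: t, y = x := by
          intro y hy
          have hle := pv_le_getLast hs (by simp) y hy
          rw [hlast, ← hx] at hle
          have hge : x ≤ y := by
            rcases List.mem_cons.mp hy with h | h
            · simp [h]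
            · exact (List.pairwise_cons.mp hs).1 y h
          omega
        have hrep : x :: t = List.replicate (t.length + 1) x := by
          apply List.eq_replicate_of_mem
          intro y hy; exact hall y hy
        rw [hlast, ← hx, hrep]
        rw [List.replicate_succ, List.erase_cons_head, ← List.replicate_succ,
           List.dropLast_eq_take, List.length_replicate, Nat.add_sub_cancel,
           List.take_replicate]
        simp
      · rw [hlast, List.erase_cons_tail (by simp [beq_iff_eq]; exact fun h => hx h)]
        rw [ih (List.pairwise_cons.mp hs).2 (by simp [ht])]
        simp [ht]

-- dropping the first and last of a sorted list stays sorted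
theorem pv_sorted_mid {m : List Int} (hs : m.Pairwise (· ≤ ·)) :
    m.dropLast.tail.Pairwise (· ≤ ·) :=
  ((hs.sublist m.dropLast_sublist).sublist m.dropLast.tail_sublist)

-- one unfolding of pvChunk
theorem pv_chunk_step {m : List Int} (hs : 2 ≤ m.length) {i : Nat} (hi : i < m.length) :
    pvChunk m i =
      m.getD 0 0 * m.getD (m.length - 1) 0 + pvChunk m.dropLast.tail (i + 1) := by
  have hLmid : m.dropLast.tail.length = m.length - 2 := by
    simp [List.length_tail]
    omega
  have hcount : (m.length - i + 2) / 3 = ((m.length - 2) - (i + 1) + 2) / 3 + 1 := by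
    omega
  unfold pvChunk
  rw [hcount, List.range_succ_eq_map]
  simp only [List.map_cons, List.sum_cons, List.map_map]
  rw [hLmid]
  congr 1
  congr 1
  apply List.map_congr_left
  intro j hj
  have hjlt : j < ((m.length - 2) - (i + 1) + 2) / 3 := List.mem_range.mp hj
  have hj2 : j + 1 < m.length - 1 := by omega
  have hL : 2 ≤ m.length := hs
  have e1 : m.dropLast.tail.getD j 0 = m.getD (j + 1) 0 := by
    rw [List.getD_eq_getElem?_getD, List.getD_eq_getElem?_getD]
    rw [List.getElem?_tail, List.getElem?_dropLast]
    rw [if_pos (by omega)]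
  have e2 : m.dropLast.tail.getD (m.length - 2 - 1 - j) 0 = m.getD (m.length - 1 - (j + 1)) 0 := by
    rw [List.getD_eq_getElem?_getD, List.getD_eq_getElem?_getD]
    rw [List.getElem?_tail, List.getElem?_dropLast]
    rw [if_pos (by omega)]
    congr 2
    omega
  simp only [Function.comp]
  rw [e1, e2]

-- pvChunk is 0 once the index has caught up
theorem pv_chunk_done {m : List Int} {i : Nat} (h : m.length ≤ i) : pvChunk m i = 0 := by
  unfold pvChunk
  have : (m.length - i + 2) / 3 = 0 := by omega
  simp [this]

-- the A loop computes r + pvChunk m i on sorted lists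
theorem pv_aGo_chunk :
    ∀ (fuel : Nat) (m : List Int) (i : Nat) (r : Int),
      m.Pairwise (· ≤ ·) → m.length ≤ fuel + i → (m.length = 1 → 1 ≤ i) →
      pvAGo fuel m i r = r + pvChunk m i := by
  intro fuel
  induction fuel with
  | zero =>
    intro m i r _ hlen _
    rw [pvAGo, pv_chunk_done (by omega)]
    ring
  | succ fuel ih =>
    intro m i r hs hlen h1
    rw [pvAGo]
    by_cases hi : i < m.length
    · rw [if_pos hi]
      have hL2 : 2 ≤ m.length := by
        rcases Nat.lt_or_ge m.length 2 with h | h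
        · interval_cases hml : m.length <;> omega
        · exact h
      rcases m with _ | ⟨x, t⟩
      · simp at hi
      have htne : t ≠ [] := by
        intro h; subst h; simp at hL2
      have hlast : (x :: t).getLast (by simp) = t.getLast htne := List.getLast_cons htne
      rw [PySem.List.max?_id_cons, PySem.List.min?_id_cons,
          pv_foldl_max_sorted x hs, pv_foldl_min_sorted x hs]
      dsimp only
      rw [PySem.List.remove?_eq_some_erase _ _ (List.getLast_mem _),
          pv_erase_getLast hs (by simp)]
      dsimp only
      -- (x :: t).dropLast = x :: t.dropLast
      have hdl : (x :: t).dropLast = x :: t.dropLast := List.dropLast_cons_of_ne_nil htne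
      rw [hdl]
      have hsdl : (x :: t.dropLast).Pairwise (· ≤ ·) := hs.sublist (by
        rw [← hdl]; exact List.dropLast_sublist _)
      rw [PySem.List.min?_id_cons, pv_foldl_min_sorted x hsdl]
      dsimp only
      rw [PySem.List.remove?_cons_self]
      dsimp only
      have hmidlen : t.dropLast.length = (x :: t).length - 2 := by
        simp [List.length_dropLast]
      rw [ih t.dropLast (i + 1) (r + (x :: t).getLast (by simp) * x)
            (by have h := pv_sorted_mid hs; rw [hdl] at h; exact h)
            (by omega) (by omega)]
      rw [pv_chunk_step hL2 hi]
      have : (x :: t).dropLast.tail = t.dropLast := by rw [hdl]; rfl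
      rw [this]
      have hg0 : (x :: t).getD 0 0 = x := rfl
      have hgl : (x :: t).getD ((x :: t).length - 1) 0 = (x :: t).getLast (by simp) := by
        rw [List.getD_eq_getElem?_getD, ← List.getLast?_eq_getElem?,
            List.getLast?_eq_some_getLast (by simp)]
        rfl
      rw [hg0, hgl]
      ring
    · rw [if_neg hi, pv_chunk_done (by omega)]
      ring

-- the B fold computes pvChunk s 0
theorem pv_alt_chunk (arr : List Int) :
    min_sum3_alt arr = pvChunk (PySem.List.sorted arr (fun y => y)) 0 := by
  unfold min_sum3_alt pvChunk
  dsimp only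
  set s := PySem.List.sorted arr (fun y => y) with hsdef
  have hn : (s.length : Int) + 2 = ((s.length + 2 : Nat) : Int) := by push_cast; ring
  have h3 : (3 : Int) = ((3 : Nat) : Int) := by norm_num
  rw [hn, h3, PySem.Int.floordiv_natCast, PySem.List.pyRange_zero_nat,
      List.foldl_map, PySem.List.foldl_add]
  rw [Nat.sub_zero]
  rw [zero_add]
  congr 1
  apply List.map_congr_left
  intro k hk
  have hklt : k < (s.length + 2) / 3 := List.mem_range.mp hk
  have hsl : 1 ≤ s.length := by
    by_contra h
    have : s.length = 0 := by omega
    rw [this] at hklt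
    omega
  have hkle : k < s.length := by omega
  have e1 : (PySem.List.pyGet? s (k : Int)).getD 0 = s.getD k 0 := by
    rw [PySem.List.pyGet?_natCast]
    rw [List.getD_eq_getElem?_getD]
  have hidx : (s.length : Int) - 1 - (k : Int) = ((s.length - 1 - k : Nat) : Int) := by
    push_cast [Nat.cast_sub (by omega : k ≤ s.length - 1), Nat.cast_sub (by omega : 1 ≤ s.length)]
    ring
  have e2 : (PySem.List.pyGet? s ((s.length : Int) - 1 - (k : Int))).getD 0
      = s.getD (s.length - 1 - k) 0 := by
    rw [hidx, PySem.List.pyGet?_natCast, List.getD_eq_getElem?_getD]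
  rw [e1, e2]

-- ===== VERDICT (by name: the statement is the Claim_ definition above) =====
theorem min_sum3_spec : Claim_equal_min_sum3 := by
  intro arr _ hpre
  unfold Spec_min_sum3 min_sum3
  set s := PySem.List.sorted arr (fun y => y) with hsdef
  have hsp : s.Pairwise (· ≤ ·) := by
    have := PySem.List.sorted_pairwise arr (fun y => y)
    simpa using this
  have hlen : s.length = arr.length := PySem.List.length_sorted arr _ _
  rw [pv_aGo_chunk arr.length s 0 0 hsp (by omega) (by
    intro h; exfalso; exact hpre (by omega))]
  rw [pv_alt_chunk arr]
  ring
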